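-- pv_equiv track=rewrite | github.com/pythagonacci/provis | backend/app/capabilities.py | _route_key
-- ===== SOURCE A (Python) =====
-- def _normalize_param(segment: str) -> str:
--     """Normalize route parameter segments to a common format."""
--     # Express/Next.js dynamic routes
--     if segment.startswith("[") and segment.endswith("]"):
--         return "{" + segment[1:-1] + "}"
--     # Express/FastAPI params
--     if segment.startswith(":"):
--         return "{" + segment[1:] + "}"
--     # FastAPI path params
--     if segment.startswith("{") and segment.endswith("}"):
--         return segment
--     return segment
--
-- def _normalize_route(route: str, strip_method: bool = True) -> str:
--     """Normalize route paths to a canonical form."""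
--     if not route:
--         return "/"
--
--     # Extract HTTP method if present (e.g., "GET /users" -> "/users")
--     r = route.strip()
--     method = ""
--     if strip_method and " " in r:
--         method, r = r.split(" ", 1)
--         r = r.strip()
--
--     # Ensure leading slash, trim trailing slash
--     if not r.startswith("/"):
--         r = "/" + r
--     if len(r) > 1 and r.endswith("/"):
--         r = r[:-1]
--
--     # Normalize path parameters
--     segments = r.split("/")
--     normalized = "/".join(_normalize_param(s) for s in segments if s)
--
--     return f"{method} /{normalized}".strip() if method and not strip_method else f"/{normalized}"
--
-- def _route_key(route: str, kind: str) -> str: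
--     """Generate grouping key for a route."""
--     r = _normalize_route(route)
--
--     # Strip /api prefix for API routes to pair with UI
--     if kind == "api" and r.startswith("/api/"):
--         r = r[4:]
--
--     # Extract meaningful path segments
--     segments = [s for s in r.split("/") if s and not s.startswith("{")]
--     if not segments:
--         return "root"
--
--     # Use first two non-param segments as key
--     key = "/".join(segments[:2])
--     return key
-- ===== SOURCE B (Python) =====
-- def _route_key(route: str, kind: str) -> str:
--     """Generate grouping key for a route (single-pass over raw segments)."""
--     r = route.strip()
--     if " " in r:
--         r = r.split(" ", 1)[1].strip()
--     segs = [s for s in r.split("/") if s]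
--     if kind == "api" and len(segs) >= 2 and segs[0] == "api":
--         segs = segs[1:]
--     keep = []
--     for s in segs:
--         if not (s.startswith("{") or s.startswith(":")
--                 or (s.startswith("[") and s.endswith("]"))):
--             keep.append(s)
--             if len(keep) == 2:
--                 break
--     return "/".join(keep) if keep else "root"
-- ===== Notes on version B (the rewrite author's own statement) =====
-- stated objective: simpler
-- what changed: B normalizes the path once (strip, drop the pre-space method token, split on '/', keep non-empty segments) and collects the first two non-parameter raw segments in a single pass, detecting parameters directly on the raw segment ('{'-, ':'-prefixed or '[...]'), instead of A's rewrite of every segment to '{...}' form followed by a join and a re-split of the normalized string.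
import Mathlib
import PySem

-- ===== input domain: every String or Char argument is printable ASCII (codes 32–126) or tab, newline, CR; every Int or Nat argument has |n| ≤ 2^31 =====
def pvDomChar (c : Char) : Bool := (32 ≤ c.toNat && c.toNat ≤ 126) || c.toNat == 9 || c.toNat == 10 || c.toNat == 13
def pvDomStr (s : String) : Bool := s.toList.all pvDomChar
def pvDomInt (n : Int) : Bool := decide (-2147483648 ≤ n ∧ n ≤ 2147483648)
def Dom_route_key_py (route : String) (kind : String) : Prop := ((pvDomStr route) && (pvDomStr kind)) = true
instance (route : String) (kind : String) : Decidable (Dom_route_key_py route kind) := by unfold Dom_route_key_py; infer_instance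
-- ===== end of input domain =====

-- B normalizes the path once and collects the first two non-parameter raw segments in a
-- single pass, skipping A's intermediate '{…}' rewriting and join/re-split roundtrip (objective: simpler).

-- ===== PORT A =====
def pvNormalizeParam (segment : List Char) : List Char :=
  if PySem.Chars.startswith segment ['['] && PySem.Chars.endswith segment [']'] then
    '{' :: (PySem.Chars.slice segment (some 1) (some (-1)) ++ ['}'])
  else if PySem.Chars.startswith segment [':'] then
    '{' :: (PySem.Chars.slice segment (some 1) none ++ ['}'])
  else if PySem.Chars.startswith segment ['{'] && PySem.Chars.endswith segment ['}'] then
    segment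
  else segment

def pvNormalizeRoute (route : List Char) (strip_method : Bool) : List Char :=
  if route = [] then ['/']
  else
    let r0 := PySem.Chars.strip route
    -- `method, r = r.split(" ", 1)` ported as two conditional bindings
    let method :=
      if strip_method && PySem.Chars.isIn [' '] r0 then
        (PySem.Chars.splitOnMax r0 [' '] 1).getD 0 []
      else []
    let r1 :=
      if strip_method && PySem.Chars.isIn [' '] r0 then
        PySem.Chars.strip ((PySem.Chars.splitOnMax r0 [' '] 1).getD 1 [])
      else r0
    let r2 := if !PySem.Chars.startswith r1 ['/'] then '/' :: r1 else r1
    let r3 := if decide (1 < r2.length) && PySem.Chars.endswith r2 ['/'] then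
        PySem.Chars.slice r2 none (some (-1)) else r2
    let segments := PySem.Chars.splitOn r3 ['/']
    let normalized := PySem.Chars.join ['/'] ((segments.filter (fun s => !s.isEmpty)).map pvNormalizeParam)
    if !method.isEmpty && !strip_method then
      PySem.Chars.strip (method ++ ' ' :: '/' :: normalized)
    else '/' :: normalized

def route_key_py (route : String) (kind : String) : String :=
  let r := pvNormalizeRoute route.toList true
  let r := if kind == "api" && PySem.Chars.startswith r ['/', 'a', 'p', 'i', '/'] then
      PySem.Chars.slice r (some 4) none else r
  let segments := (PySem.Chars.splitOn r ['/']).filter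
      (fun s => !s.isEmpty && !PySem.Chars.startswith s ['{'])
  if segments.isEmpty then "root"
  else String.mk (PySem.Chars.join ['/'] (segments.take 2))

-- ===== PORT B =====
def pvIsParam (s : List Char) : Bool :=
  PySem.Chars.startswith s ['{'] || PySem.Chars.startswith s [':'] ||
    (PySem.Chars.startswith s ['['] && PySem.Chars.endswith s [']'])

-- the accumulating loop with `break` once two segments are kept (n = remaining slots)
def pvTakeNonParam : Nat → List (List Char) → List (List Char)
  | _, [] => []
  | 0, _ :: _ => []
  | Nat.succ n, s :: rest =>
    if pvIsParam s then pvTakeNonParam (Nat.succ n) rest else s :: pvTakeNonParam n rest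

def route_key_py_alt (route : String) (kind : String) : String :=
  let r0 := PySem.Chars.strip route.toList
  let r1 := if PySem.Chars.isIn [' '] r0 then
      PySem.Chars.strip ((PySem.Chars.splitOnMax r0 [' '] 1).getD 1 []) else r0
  let segs := (PySem.Chars.splitOn r1 ['/']).filter (fun s => !s.isEmpty)
  let segs2 := if kind == "api" && decide (2 ≤ segs.length) && (segs.getD 0 [] == ['a', 'p', 'i']) then
      segs.tail else segs
  let keep := pvTakeNonParam 2 segs2
  if keep.isEmpty then "root" else String.mk (PySem.Chars.join ['/'] keep)

-- ===== PRECONDITION & SPEC =====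
def Spec_route_key_py (route : String) (kind : String) (out : String) : Prop := out = route_key_py_alt route kind
instance (route : String) (kind : String) (out : String) : Decidable (Spec_route_key_py route kind out) := by unfold Spec_route_key_py; infer_instance

-- ===== CLAIM (what is proved, stated in full; the proofs are below) =====
def Claim_equal_route_key_py : Prop := ∀ (route : String) (kind : String), Dom_route_key_py route kind → Spec_route_key_py route kind (route_key_py route kind)

-- ===== LEMMAS AND PROOFS =====

-- splitting on a single character, as a structural recursion
def fsplit (c : Char) : List Char → List (List Char)
  | [] => [[]]
  | a :: rest =>
    if a = c then [] :: fsplit c rest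
    else (a :: (fsplit c rest).headD []) :: (fsplit c rest).tail

theorem fsplit_ne_nil (c : Char) (l : List Char) : fsplit c l ≠ [] := by
  cases l with
  | nil => simp [fsplit]
  | cons a rest => simp only [fsplit]; split <;> simp

theorem headD_cons_tail {α : Type} {l : List (List α)} (h : l ≠ []) :
    l.headD [] :: l.tail = l := by
  cases l with
  | nil => exact absurd rfl h
  | cons a t => simp

theorem splitOn_go_spec (c : Char) : ∀ fuel l cur acc, l.length ≤ fuel →
    PySem.Chars.splitOn.go [c] fuel l cur acc =
      acc.reverse ++ (cur.reverse ++ (fsplit c l).headD []) :: (fsplit c l).tail := by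
  intro fuel
  induction fuel with
  | zero =>
    intro l cur acc h
    have : l = [] := List.eq_nil_of_length_eq_zero (Nat.le_zero.mp h)
    subst this
    simp [PySem.Chars.splitOn.go, fsplit]
  | succ n ih =>
    intro l cur acc h
    cases l with
    | nil => simp [PySem.Chars.splitOn.go, fsplit]
    | cons a rest =>
      simp only [PySem.Chars.splitOn.go]
      by_cases hac : a = c
      · subst hac
        simp only [List.isPrefixOf, BEq.rfl, Bool.and_true, if_pos]
        rw [ih _ _ _ (by simpa using Nat.le_of_succ_le_succ h)]
        simp [fsplit]
        rw [← List.headD_eq_head?_getD]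
        exact headD_cons_tail (fsplit_ne_nil a rest)
      · have hp : List.isPrefixOf [c] (a :: rest) = false := by
          simp [List.isPrefixOf]; exact fun h' => absurd h'.symm hac
        rw [if_neg (by simp [hp])]
        rw [ih _ _ _ (by simpa using Nat.le_of_succ_le_succ h)]
        simp [fsplit, hac]

theorem splitOn_eq_fsplit (c : Char) (s : List Char) :
    PySem.Chars.splitOn s [c] = fsplit c s := by
  rw [PySem.Chars.splitOn, splitOn_go_spec c _ _ _ _ (by omega)]
  simpa using headD_cons_tail (fsplit_ne_nil c s)

theorem fsplit_cons_sep (c : Char) (r : List Char) : fsplit c (c :: r) = [] :: fsplit c r := by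
  simp [fsplit]

theorem fsplit_append_free (c : Char) (m X : List Char) (h : c ∉ m) :
    fsplit c (m ++ X) = (m ++ (fsplit c X).headD []) :: (fsplit c X).tail := by
  induction m with
  | nil => simpa using (headD_cons_tail (fsplit_ne_nil c X)).symm
  | cons a t ih =>
    have hac : a ≠ c := fun e => h (by simp [e])
    simp only [List.cons_append, fsplit, if_neg hac, ih (fun hm => h (List.mem_cons_of_mem _ hm))]
    simp

theorem fsplit_free (c : Char) (m : List Char) (h : c ∉ m) : fsplit c m = [m] := by
  have := fsplit_append_free c m [] h
  simpa [fsplit] using this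

theorem fsplit_snoc (c : Char) (s : List Char) : fsplit c (s ++ [c]) = fsplit c s ++ [[]] := by
  induction s with
  | nil => simp [fsplit]
  | cons a t ih =>
    by_cases hac : a = c
    · subst hac; simp [fsplit, ih]
    · simp only [List.cons_append, fsplit, if_neg hac, ih]
      have h1 := fsplit_ne_nil c t
      cases h : fsplit c t with
      | nil => exact absurd h h1
      | cons b u => simp

theorem mem_fsplit_not_mem (c : Char) (s : List Char) (p : List Char) (hp : p ∈ fsplit c s) : c ∉ p := by
  induction s generalizing p with
  | nil => simp [fsplit] at hp; simp [hp]
  | cons a t ih =>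
    by_cases hac : a = c
    · subst hac
      simp [fsplit] at hp
      rcases hp with rfl | hp
      · simp
      · exact ih p hp
    · simp only [fsplit, if_neg hac, List.mem_cons] at hp
      rcases hp with rfl | hp
      · intro hm
        rcases List.mem_cons.mp hm with rfl | hm
        · exact hac rfl
        · have : (fsplit c t).headD [] ∈ fsplit c t := by
            cases h : fsplit c t with
            | nil => exact absurd h (fsplit_ne_nil c t)
            | cons b u => simp
          exact ih _ this hm
      · exact ih p (List.mem_of_mem_tail hp)

theorem intercalate_cons₂ (c : Char) (x y : List Char) (R : List (List Char)) :
    List.intercalate [c] (x :: y :: R) = x ++ c :: List.intercalate [c] (y :: R) := by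
  simp [List.intercalate, List.intersperse]

theorem intercalate_cons_ne (c : Char) (x : List Char) (Y : List (List Char)) (hY : Y ≠ []) :
    List.intercalate [c] (x :: Y) = x ++ c :: List.intercalate [c] Y := by
  cases Y with
  | nil => exact absurd rfl hY
  | cons y R => exact intercalate_cons₂ c x y R

theorem fsplit_intercalate (c : Char) (M : List (List Char)) (hM : M ≠ [])
    (hfree : ∀ p ∈ M, c ∉ p) : fsplit c (List.intercalate [c] M) = M := by
  induction M with
  | nil => exact absurd rfl hM
  | cons m M' ih =>
    cases M' with
    | nil => simp [List.intercalate, fsplit_free c m (hfree m (by simp))]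
    | cons m2 M'' =>
      rw [intercalate_cons₂, fsplit_append_free c m _ (hfree m (by simp))]
      have hstep : fsplit c (c :: List.intercalate [c] (m2 :: M'')) = [] :: fsplit c (List.intercalate [c] (m2 :: M'')) := by
        simp [fsplit]
      rw [hstep, ih (by simp) (fun p hp => hfree p (by simp [hp]))]
      simp

theorem st_single (a x : Char) (t : List Char) :
    PySem.Chars.startswith (a :: t) [x] = (x == a) := by
  simp [PySem.Chars.startswith, List.isPrefixOf]

theorem norm_of_not_param (s : List Char) (h : pvIsParam s = false) : pvNormalizeParam s = s := by
  simp [pvIsParam] at h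
  obtain ⟨⟨h1, h2⟩, h3⟩ := h
  unfold pvNormalizeParam
  rw [if_neg, if_neg]
  · split <;> rfl
  · simp [h2]
  · intro hc
    rw [h3 (Bool.and_elim_left hc)] at hc
    simp at hc

theorem norm_starts_brace (s : List Char) (h : pvIsParam s = true) :
    PySem.Chars.startswith (pvNormalizeParam s) ['{'] = true := by
  cases s with
  | nil => exact absurd h (by decide)
  | cons a t =>
    unfold pvNormalizeParam
    by_cases ha : a = '['
    · subst ha
      have h' : PySem.Chars.endswith ('[' :: t) [']'] = true := by
        simpa [pvIsParam, st_single] using h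
      rw [st_single, if_pos (by simp [h']), st_single]
      simp
    · rw [st_single, if_neg (by simp [Bool.and_eq_true]; intro hc; exact absurd (by simpa using hc.symm) ha)]
      by_cases hb : a = ':'
      · subst hb; rw [st_single, if_pos (by simp), st_single]; simp
      · have hc : a = '{' := by
          simp [pvIsParam, st_single] at h
          rcases h with h | h
          · rcases h with h | h
            · exact h.symm
            · exact absurd h.symm hb
          · exact absurd h.1.symm ha
        subst hc
        rw [st_single, if_neg (by simp)]
        split <;> (rw [st_single]; simp)

theorem slash_not_mem_norm (s : List Char) (h : ('/' : Char) ∉ s) :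
    ('/' : Char) ∉ pvNormalizeParam s := by
  unfold pvNormalizeParam
  have hs1 : PySem.Chars.slice s (some 1) (some (-1)) = s.tail.dropLast := by
    cases s with
    | nil => simp [PySem.List.slice]
    | cons a t => simp [PySem.List.slice, List.dropLast_eq_take]
  have hs2 : PySem.Chars.slice s (some 1) none = s.drop 1 := by simp [pysem]
  split
  · rw [hs1]
    intro hm
    rcases List.mem_cons.mp hm with he | hm
    · exact absurd he.symm (by decide)
    · rcases List.mem_append.mp hm with hm | hm
      · exact h (List.mem_of_mem_tail (List.mem_of_mem_dropLast hm))
      · simp at hm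
  · split
    · rw [hs2]
      intro hm
      rcases List.mem_cons.mp hm with he | hm
      · exact absurd he.symm (by decide)
      · rcases List.mem_append.mp hm with hm | hm
        · exact h (List.mem_of_mem_drop hm)
        · simp at hm
    · split <;> exact h

theorem norm_eq_api_iff (s : List Char) : (pvNormalizeParam s = ['a', 'p', 'i']) ↔ s = ['a', 'p', 'i'] := by
  constructor
  · intro h
    by_cases hp : pvIsParam s = true
    · have := norm_starts_brace s hp
      rw [h] at this
      exact absurd this (by decide)
    · have hp' : pvIsParam s = false := by simpa using hp
      rwa [norm_of_not_param s hp'] at h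
  · intro h; subst h; decide

theorem pvTakeNonParam_eq (l : List (List Char)) : ∀ n,
    pvTakeNonParam n l = (l.filter (fun s => !pvIsParam s)).take n := by
  induction l with
  | nil => intro n; cases n <;> rfl
  | cons s rest ih =>
    intro n
    cases n with
    | zero => simp [pvTakeNonParam]
    | succ n =>
      cases hp : pvIsParam s with
      | true => simp [pvTakeNonParam, hp, ih]
      | false => simp [pvTakeNonParam, hp, ih]

theorem no_apis_prefix (m : List Char) (h : ('/' : Char) ∉ m) :
    List.isPrefixOf ['a', 'p', 'i', '/'] m = false := by
  rcases m with _ | ⟨c1, _ | ⟨c2, _ | ⟨c3, _ | ⟨c4, r⟩⟩⟩⟩ <;>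
    simp_all [List.isPrefixOf]

theorem api_prefix_cons (m X : List Char) (h : ('/' : Char) ∉ m) :
    List.isPrefixOf ['a', 'p', 'i', '/'] (m ++ '/' :: X) = (m == ['a', 'p', 'i']) := by
  rcases m with _ | ⟨c1, _ | ⟨c2, _ | ⟨c3, _ | ⟨c4, r⟩⟩⟩⟩ <;>
    simp_all [List.isPrefixOf, BEq.comm]
  exact fun _ _ _ hc => h.2.2.2.1 hc.symm

theorem api_cond (L : List (List Char)) (hfree : ∀ p ∈ L, ('/' : Char) ∉ p) :
    PySem.Chars.startswith ('/' :: PySem.Chars.join ['/'] (L.map pvNormalizeParam)) ['/', 'a', 'p', 'i', '/']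
      = (decide (2 ≤ L.length) && (L.getD 0 [] == ['a', 'p', 'i'])) := by
  cases L with
  | nil => decide
  | cons m M' =>
    cases M' with
    | nil =>
      have hf : ('/' : Char) ∉ pvNormalizeParam m := slash_not_mem_norm m (hfree m (by simp))
      simp [PySem.Chars.join, List.intercalate, PySem.Chars.startswith, List.isPrefixOf,
        no_apis_prefix _ hf]
    | cons m2 M'' =>
      have hf : ('/' : Char) ∉ pvNormalizeParam m := slash_not_mem_norm m (hfree m (by simp))
      have hbeq : (pvNormalizeParam m == ['a', 'p', 'i']) = (m == ['a', 'p', 'i']) := by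
        by_cases hm : m = ['a', 'p', 'i']
        · subst hm; decide
        · have h2 : pvNormalizeParam m ≠ ['a', 'p', 'i'] := fun h => hm ((norm_eq_api_iff m).mp h)
          simp [hm, h2]
      rw [PySem.Chars.join, List.map_cons, List.map_cons, intercalate_cons₂]
      simp only [PySem.Chars.startswith, List.isPrefixOf, BEq.rfl, Bool.true_and]
      rw [api_prefix_cons _ _ hf, hbeq]
      simp

theorem filter_norm (L : List (List Char)) (hne : ∀ p ∈ L, p ≠ []) :
    (L.map pvNormalizeParam).filter (fun s => !s.isEmpty && !PySem.Chars.startswith s ['{'])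
      = L.filter (fun s => !pvIsParam s) := by
  induction L with
  | nil => rfl
  | cons p rest ih =>
    simp only [List.map_cons, List.filter_cons]
    cases hp : pvIsParam p with
    | true =>
      rw [norm_starts_brace p hp]
      simp [ih (fun q hq => hne q (by simp [hq]))]
    | false =>
      rw [norm_of_not_param p hp]
      have h1 : p.isEmpty = false := by
        cases p with
        | nil => exact absurd rfl (hne [] (by simp))
        | cons a t => rfl
      have h2 : PySem.Chars.startswith p ['{'] = false := by
        simp [pvIsParam] at hp
        exact hp.1.1
      simp [h1, h2, ih (fun q hq => hne q (by simp [hq]))]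

theorem take_two_isEmpty (l : List (List Char)) : (l.take 2).isEmpty = l.isEmpty := by
  cases l <;> rfl

theorem final_step (L' : List (List Char)) (hfree : ∀ p ∈ L', ('/' : Char) ∉ p)
    (hne : ∀ p ∈ L', p ≠ []) :
    (if (((fsplit '/' ('/' :: PySem.Chars.join ['/'] (L'.map pvNormalizeParam))).filter
        (fun s => !s.isEmpty && !PySem.Chars.startswith s ['{']))).isEmpty then "root"
     else String.mk (PySem.Chars.join ['/']
        (((fsplit '/' ('/' :: PySem.Chars.join ['/'] (L'.map pvNormalizeParam))).filter
          (fun s => !s.isEmpty && !PySem.Chars.startswith s ['{'])).take 2)))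
    = (if (pvTakeNonParam 2 L').isEmpty then "root"
       else String.mk (PySem.Chars.join ['/'] (pvTakeNonParam 2 L'))) := by
  cases L' with
  | nil => decide
  | cons m M =>
    have hmapne : (List.map pvNormalizeParam (m :: M)) ≠ [] := by simp
    have hmapfree : ∀ p ∈ (m :: M).map pvNormalizeParam, ('/' : Char) ∉ p := by
      intro p hp
      obtain ⟨q, hq, rfl⟩ := List.mem_map.mp hp
      exact slash_not_mem_norm q (hfree q hq)
    rw [fsplit_cons_sep, PySem.Chars.join, fsplit_intercalate '/' _ hmapne hmapfree]
    rw [List.filter_cons]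
    simp only [List.isEmpty_nil]
    rw [show ((List.filter (fun s => !s.isEmpty && !PySem.Chars.startswith s ['{']) (List.map pvNormalizeParam (m :: M)))) = (m :: M).filter (fun s => !pvIsParam s) from filter_norm _ hne]
    rw [pvTakeNonParam_eq]
    rw [take_two_isEmpty]
    rfl

-- the common tail of both ports, as functions of the method-stripped string r1
def keyA (r1 : List Char) (kind : String) : String :=
  let r2 := if !PySem.Chars.startswith r1 ['/'] then '/' :: r1 else r1
  let r3 := if decide (1 < r2.length) && PySem.Chars.endswith r2 ['/'] then
      PySem.Chars.slice r2 none (some (-1)) else r2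
  let normalized := PySem.Chars.join ['/'] (((PySem.Chars.splitOn r3 ['/']).filter (fun s => !s.isEmpty)).map pvNormalizeParam)
  let r := '/' :: normalized
  let r' := if kind == "api" && PySem.Chars.startswith r ['/', 'a', 'p', 'i', '/'] then
      PySem.Chars.slice r (some 4) none else r
  let segments := (PySem.Chars.splitOn r' ['/']).filter
      (fun s => !s.isEmpty && !PySem.Chars.startswith s ['{'])
  if segments.isEmpty then "root" else String.mk (PySem.Chars.join ['/'] (segments.take 2))

def keyB (r1 : List Char) (kind : String) : String :=
  let segs := (PySem.Chars.splitOn r1 ['/']).filter (fun s => !s.isEmpty)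
  let segs2 := if kind == "api" && decide (2 ≤ segs.length) && (segs.getD 0 [] == ['a', 'p', 'i']) then
      segs.tail else segs
  let keep := pvTakeNonParam 2 segs2
  if keep.isEmpty then "root" else String.mk (PySem.Chars.join ['/'] keep)

theorem filt_fsplit_adjust (r1 : List Char) :
    ((fsplit '/' (if decide (1 < (if !PySem.Chars.startswith r1 ['/'] then '/' :: r1 else r1).length) &&
        PySem.Chars.endswith (if !PySem.Chars.startswith r1 ['/'] then '/' :: r1 else r1) ['/'] then
        PySem.Chars.slice (if !PySem.Chars.startswith r1 ['/'] then '/' :: r1 else r1) none (some (-1))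
      else (if !PySem.Chars.startswith r1 ['/'] then '/' :: r1 else r1))).filter (fun s => !s.isEmpty))
    = (fsplit '/' r1).filter (fun s => !s.isEmpty) := by
  have step : ∀ r2 : List Char,
      ((fsplit '/' (if decide (1 < r2.length) && PySem.Chars.endswith r2 ['/'] then
          PySem.Chars.slice r2 none (some (-1)) else r2)).filter (fun s => !s.isEmpty))
      = (fsplit '/' r2).filter (fun s => !s.isEmpty) := by
    intro r2
    cases he : (decide (1 < r2.length) && PySem.Chars.endswith r2 ['/']) with
    | false => simp
    | true =>
      have hsuf : ['/'] <:+ r2 := (PySem.Chars.endswith_iff r2 ['/']).mp (Bool.and_elim_right he)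
      obtain ⟨t, ht⟩ := hsuf
      have hslice : PySem.Chars.slice r2 none (some (-1)) = r2.dropLast := by simp [pysem]
      rw [if_pos rfl, hslice, ← ht, List.dropLast_concat, fsplit_snoc, List.filter_append]
      simp
  rw [step]
  cases hs : PySem.Chars.startswith r1 ['/'] with
  | true => simp
  | false =>
    simp only [Bool.not_false, if_true]
    rw [fsplit_cons_sep, List.filter_cons]
    simp

theorem key_core (r1 : List Char) (kind : String) : keyA r1 kind = keyB r1 kind := by
  unfold keyA keyB
  simp only [splitOn_eq_fsplit]
  rw [filt_fsplit_adjust]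
  set L := (fsplit '/' r1).filter (fun s => !s.isEmpty) with hL
  have hmemL : ∀ p ∈ L, ('/' : Char) ∉ p ∧ p ≠ [] := by
    intro p hp
    rw [hL] at hp
    refine ⟨mem_fsplit_not_mem '/' r1 p (List.mem_filter.mp hp).1, ?_⟩
    have := (List.mem_filter.mp hp).2
    simp at this
    exact this
  have hfree : ∀ p ∈ L, ('/' : Char) ∉ p := fun p hp => (hmemL p hp).1
  have hne : ∀ p ∈ L, p ≠ [] := fun p hp => (hmemL p hp).2
  rw [api_cond L hfree, ← Bool.and_assoc]
  clear_value L
  by_cases hC : (kind == "api" && decide (2 ≤ L.length) && (L.getD 0 [] == ['a', 'p', 'i'])) = true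
  case neg =>
    rw [if_neg hC, if_neg hC]
    exact final_step L hfree hne
  case pos =>
    rw [if_pos hC, if_pos hC]
    simp only [Bool.and_eq_true, beq_iff_eq, decide_eq_true_eq] at hC
    obtain ⟨⟨hk, h2⟩, hapi⟩ := hC
    rcases L with _ | ⟨l0, _ | ⟨l1, R⟩⟩
    · simp at h2
    · simp at h2
    · have hl0 : l0 = ['a', 'p', 'i'] := by simpa using hapi
      subst hl0
      have hnorm_api : pvNormalizeParam ['a', 'p', 'i'] = ['a', 'p', 'i'] := by decide
      rw [List.map_cons, hnorm_api, PySem.Chars.join,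
        intercalate_cons_ne '/' _ _ (by simp)]
      have hdrop : PySem.Chars.slice
          ('/' :: (['a', 'p', 'i'] ++ '/' :: List.intercalate ['/'] (List.map pvNormalizeParam (l1 :: R))))
          (some 4) none
          = '/' :: List.intercalate ['/'] (List.map pvNormalizeParam (l1 :: R)) := by
        simp [pysem]
      rw [hdrop, List.tail_cons]
      have := final_step (l1 :: R) (fun p hp => hfree p (by simp [hp])) (fun p hp => hne p (by simp [hp]))
      rw [PySem.Chars.join] at this
      exact this

-- ===== VERDICT (by name: the statement is the Claim_ definition above) =====

theorem route_key_py_spec : Claim_equal_route_key_py := by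
  intro route kind _
  unfold Spec_route_key_py route_key_py route_key_py_alt pvNormalizeRoute
  by_cases h0 : route.toList = []
  · rw [h0, if_pos rfl]
    exact key_core [] kind
  · rw [if_neg h0]
    simp only [Bool.true_and, Bool.not_true, Bool.and_false, Bool.false_eq_true, if_false]
    generalize (if PySem.Chars.isIn [' '] (PySem.Chars.strip route.toList) then
      PySem.Chars.strip ((PySem.Chars.splitOnMax (PySem.Chars.strip route.toList) [' '] 1).getD 1 [])
      else PySem.Chars.strip route.toList) = r1
    exact key_core r1 kind
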